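-- pv_equiv track=rewrite | github.com/arangogarcia21/Pruebatecnica | Funcionalidad 2/Escalera/escalera.py | getStaircase
-- ===== SOURCE A (Python) =====
-- def getStaircase(n):
--     staircase = ''
--     for i in range(1, n // 2 + 1):
--         staircase += ' ' * (n // 2 - i + 1) + '#' * (2 * i - 1) + '\n'
--     staircase += '#' * n + '\n'
--     for i in range(n // 2, 0, -1):
--         staircase += ' ' * (n // 2 - i + 1) + '#' * (2 * i - 1) + '\n'
--     return staircase
-- ===== SOURCE B (Python) =====
-- def getStaircase(n):
--     # Inside-out construction: start with the widest (middle) row and, moving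
--     # outwards, sandwich each narrower line onto both ends of a parts list,
--     # then join once.
--     half = n // 2
--     parts = ['#' * n + '\n']
--     for i in range(half, 0, -1):
--         line = ' ' * (half - i + 1) + '#' * (2 * i - 1) + '\n'
--         parts.insert(0, line)
--         parts.append(line)
--     return ''.join(parts)
-- ===== Notes on version B (the rewrite author's own statement) =====
-- stated objective: alternative
-- what changed: Builds the pattern inside-out: starts from the middle row and one countdown loop sandwiches each narrower line onto both ends of a parts list (insert at front, append at back), joined once at the end, instead of A's two separate top-down and bottom-up string-appending passes.
import Mathlib
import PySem

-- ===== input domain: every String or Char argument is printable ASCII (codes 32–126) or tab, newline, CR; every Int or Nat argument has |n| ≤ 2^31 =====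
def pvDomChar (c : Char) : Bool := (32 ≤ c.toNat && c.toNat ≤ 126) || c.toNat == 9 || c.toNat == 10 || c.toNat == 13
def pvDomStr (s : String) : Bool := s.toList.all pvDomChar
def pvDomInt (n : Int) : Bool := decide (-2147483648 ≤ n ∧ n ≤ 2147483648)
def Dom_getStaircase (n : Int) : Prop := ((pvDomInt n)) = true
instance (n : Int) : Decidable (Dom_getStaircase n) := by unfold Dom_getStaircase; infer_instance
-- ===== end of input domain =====

-- B builds the staircase inside-out: one countdown loop wraps each line onto both
-- ends of a parts list, replacing A's two separate appending passes; equal return values proved.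
-- Strings are built on the List Char side (PySem convention) and wrapped with String.ofList;
-- ' '*k / '#'*k is List.replicate k.toNat (exact: Python returns '' for k <= 0, toNat clamps).

-- ===== PORT A =====
-- one staircase line, the shared line expression of both programs
def pvLine (n i : Int) : List Char :=
  List.replicate (PySem.Int.floordiv n 2 - i + 1).toNat ' ' ++
    List.replicate (2 * i - 1).toNat '#' ++ ['\n']

def getStaircase (n : Int) : String :=
  -- staircase = ''; for i in range(1, n//2+1): staircase += line(i)
  let s1 := (PySem.List.pyRange 1 (PySem.Int.floordiv n 2 + 1) 1).foldl
    (fun acc i => acc ++ pvLine n i) []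
  -- staircase += '#' * n + '\n'
  let s2 := s1 ++ List.replicate n.toNat '#' ++ ['\n']
  -- for i in range(n//2, 0, -1): staircase += line(i)
  let s3 := (PySem.List.pyRange (PySem.Int.floordiv n 2) 0 (-1)).foldl
    (fun acc i => acc ++ pvLine n i) s2
  String.ofList s3

-- ===== PORT B =====
def getStaircase_alt (n : Int) : String :=
  -- parts = ['#'*n + '\n']; for i in range(half, 0, -1): parts.insert(0, line); parts.append(line)
  let mid := List.replicate n.toNat '#' ++ ['\n']
  let parts := (PySem.List.pyRange (PySem.Int.floordiv n 2) 0 (-1)).foldl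
    (fun acc i => pvLine n i :: acc ++ [pvLine n i]) [mid]
  -- return ''.join(parts)
  String.ofList parts.flatten

-- ===== PRECONDITION & SPEC =====
def Spec_getStaircase (n : Int) (out : String) : Prop := out = getStaircase_alt n
instance (n : Int) (out : String) : Decidable (Spec_getStaircase n out) := by unfold Spec_getStaircase; infer_instance

-- ===== CLAIM (what is proved, stated in full; the proofs are below) =====
def Claim_equal_getStaircase : Prop := ∀ (n : Int), Dom_getStaircase n → Spec_getStaircase n (getStaircase n)

-- ===== LEMMAS AND PROOFS =====
-- A's append loop = flattened map
theorem pv_foldl_flatten (f : Int → List Char) :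
    ∀ (l : List Int) (s : List Char),
      l.foldl (fun acc i => acc ++ f i) s = s ++ (l.map f).flatten := by
  intro l
  induction l with
  | nil => simp
  | cons a t ih => intro s; simp [List.foldl_cons, ih]

-- B's sandwiching loop = reversed lines in front, lines in order behind
theorem pv_foldl_sandwich (f : Int → List Char) :
    ∀ (l : List Int) (s : List (List Char)),
      l.foldl (fun acc i => f i :: acc ++ [f i]) s
        = l.reverse.map f ++ s ++ l.map f := by
  intro l
  induction l with
  | nil => simp
  | cons a t ih => intro s; rw [List.foldl_cons, ih]; simp [List.append_assoc]

-- ===== VERDICT (by name: the statement is the Claim_ definition above) =====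
theorem getStaircase_spec : Claim_equal_getStaircase := by
  intro n _
  unfold Spec_getStaircase getStaircase getStaircase_alt
  simp only [pv_foldl_flatten, pv_foldl_sandwich]
  rw [PySem.List.pyRange_neg_one_eq_reverse]
  simp [List.map_reverse, List.append_assoc, List.flatten_append]
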